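-- pv_equiv track=rewrite | github.com/ChipCracker/asr-eval-lib | src/asr_eval_lib/normalization.py | _strip_outer_phonetic_delimiters
-- ===== SOURCE A (Python) =====
-- def _strip_outer_phonetic_delimiters(text: str) -> str:
--     stripped = text.strip()
--     while len(stripped) >= 2 and (
--         (stripped.startswith("/") and stripped.endswith("/"))
--         or (stripped.startswith("[") and stripped.endswith("]"))
--     ):
--         stripped = stripped[1:-1].strip()
--     return stripped
-- ===== SOURCE B (Python) =====
-- def _strip_outer_phonetic_delimiters(text: str) -> str:
--     # Two-pointer inward scan: no intermediate slice/strip copies are made;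
--     # the single final slice is the answer.
--     i, k = 0, len(text)
--     while True:
--         if i < k and text[i].isspace():
--             i += 1
--         elif i < k and text[k - 1].isspace():
--             k -= 1
--         elif i + 1 < k and ((text[i] == "/" and text[k - 1] == "/")
--                             or (text[i] == "[" and text[k - 1] == "]")):
--             i += 1
--             k -= 1
--         else:
--             return text[i:k]
-- ===== Notes on version B (the rewrite author's own statement) =====
-- stated objective: alternative
-- what changed: Replaces A's while loop that repeatedly builds new strings (strip() plus text[1:-1].strip() per peeled layer) with a single two-pointer loop moving indices i and k inward past whitespace and matched delimiter pairs, taking one final slice.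
import Mathlib
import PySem

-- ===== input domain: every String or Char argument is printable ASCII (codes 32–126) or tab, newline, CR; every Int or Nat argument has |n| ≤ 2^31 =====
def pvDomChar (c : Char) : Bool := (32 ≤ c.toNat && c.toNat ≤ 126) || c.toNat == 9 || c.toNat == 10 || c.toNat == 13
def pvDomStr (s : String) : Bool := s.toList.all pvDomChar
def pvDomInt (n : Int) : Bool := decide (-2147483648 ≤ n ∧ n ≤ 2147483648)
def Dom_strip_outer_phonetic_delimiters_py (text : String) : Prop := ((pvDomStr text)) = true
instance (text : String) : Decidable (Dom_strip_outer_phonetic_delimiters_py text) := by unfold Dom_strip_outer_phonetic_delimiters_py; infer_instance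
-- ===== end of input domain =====

-- B replaces A's repeated slice-and-strip copying with a two-pointer inward index scan
-- (one final slice); proved to return the same string on every input (objective: alternative).
-- ===== PORT A =====

-- termination helpers for port A's while loop (cited in its decreasing_by)
theorem pvStripLenLe (s : List Char) :
    (PySem.Chars.strip s).length ≤ s.length := by
  simp only [PySem.Chars.strip, PySem.Chars.rstrip, PySem.Chars.lstrip, List.length_reverse]
  calc (List.dropWhile PySem.Chars.isspace (List.dropWhile PySem.Chars.isspace s).reverse).length
      ≤ (List.dropWhile PySem.Chars.isspace s).reverse.length := List.length_dropWhile_le _ _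
    _ = (List.dropWhile PySem.Chars.isspace s).length := by simp
    _ ≤ s.length := List.length_dropWhile_le _ _

theorem pvSliceOneNegOne (s : List Char) (h : 2 ≤ s.length) :
    PySem.List.slice s (some 1) (some (-1)) = (s.drop 1).take (s.length - 2) := by
  have h1 : PySem.List.clampIdx s.length 1 = 1 := by
    unfold PySem.List.clampIdx
    rw [if_neg (by norm_num)]
    omega
  have h2 : PySem.List.clampIdx s.length (-1) = s.length - 1 := by
    unfold PySem.List.clampIdx
    rw [if_pos (by norm_num), if_neg (by omega)]
    omega
  simp only [PySem.List.slice, h1, h2]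
  congr 1

theorem pvSliceOneNegOneLen (s : List Char) (h : 2 ≤ s.length) :
    (PySem.Chars.strip (PySem.List.slice s (some 1) (some (-1)))).length < s.length := by
  rw [pvSliceOneNegOne s h]
  have := pvStripLenLe ((s.drop 1).take (s.length - 2))
  have hlen : ((s.drop 1).take (s.length - 2)).length ≤ s.length - 2 := by
    simp [List.length_take]
  omega

-- the 'while' loop of A: peel one layer (text[1:-1].strip()) while delimited
def pvALoop (stripped : List Char) : List Char :=
  if h : 2 ≤ stripped.length ∧
      ((PySem.Chars.startswith stripped ['/'] = true ∧ PySem.Chars.endswith stripped ['/'] = true) ∨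
       (PySem.Chars.startswith stripped ['['] = true ∧ PySem.Chars.endswith stripped [']'] = true)) then
    pvALoop (PySem.Chars.strip (PySem.List.slice stripped (some 1) (some (-1))))
  else stripped
termination_by stripped.length
decreasing_by exact pvSliceOneNegOneLen stripped h.1

def strip_outer_phonetic_delimiters_py (text : String) : String :=
  String.ofList (pvALoop (PySem.Chars.strip text.toList))

-- ===== PORT B =====

-- matching outer delimiter pair test of Source B's third branch
def pvMatchEnds (a b : Char) : Bool := (a == '/' && b == '/') || (a == '[' && b == ']')

-- Source B's single loop over the two indices i (inclusive) and k (exclusive)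
def pvBGo (cs : List Char) (i k : Nat) : List Char :=
  if h1 : i < k ∧ PySem.Chars.isspace (cs.getD i ' ') = true then
    pvBGo cs (i + 1) k
  else if h2 : i < k ∧ PySem.Chars.isspace (cs.getD (k - 1) ' ') = true then
    pvBGo cs i (k - 1)
  else if h3 : i + 1 < k ∧ pvMatchEnds (cs.getD i ' ') (cs.getD (k - 1) ' ') = true then
    pvBGo cs (i + 1) (k - 1)
  else
    PySem.List.slice cs (some (i : Int)) (some (k : Int))
termination_by k - i
decreasing_by all_goals omega

def strip_outer_phonetic_delimiters_py_alt (text : String) : String :=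
  String.ofList (pvBGo text.toList 0 text.toList.length)

-- ===== PRECONDITION & SPEC =====
def Spec_strip_outer_phonetic_delimiters_py (text : String) (out : String) : Prop := out = strip_outer_phonetic_delimiters_py_alt text
instance (text : String) (out : String) : Decidable (Spec_strip_outer_phonetic_delimiters_py text out) := by unfold Spec_strip_outer_phonetic_delimiters_py; infer_instance

-- ===== CLAIM (what is proved, stated in full; the proofs are below) =====
def Claim_equal_strip_outer_phonetic_delimiters_py : Prop := ∀ (text : String), Dom_strip_outer_phonetic_delimiters_py text → Spec_strip_outer_phonetic_delimiters_py text (strip_outer_phonetic_delimiters_py text)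

-- ===== LEMMAS AND PROOFS =====

-- strip drops a whitespace head
theorem pvStripConsWs {c : Char} (hc : PySem.Chars.isspace c = true) (xs : List Char) :
    PySem.Chars.strip (c :: xs) = PySem.Chars.strip xs := by
  simp [PySem.Chars.strip, PySem.Chars.lstrip, List.dropWhile_cons_of_pos, hc]

-- strip drops a whitespace last element
theorem pvStripAppendWs {c : Char} (hc : PySem.Chars.isspace c = true) (xs : List Char) :
    PySem.Chars.strip (xs ++ [c]) = PySem.Chars.strip xs := by
  simp only [PySem.Chars.strip, PySem.Chars.lstrip, PySem.Chars.rstrip, List.dropWhile_append]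
  split
  · next h =>
    have hx : List.dropWhile PySem.Chars.isspace xs = [] := by
      simpa [List.isEmpty_iff] using h
    simp [List.dropWhile_cons_of_pos, hc, hx, List.dropWhile_nil]
  · next h =>
    simp [List.reverse_append, List.dropWhile_cons_of_pos, hc]

-- strip is the identity when both ends are non-whitespace
theorem pvStripSelf {x y : Char} (hx : ¬ PySem.Chars.isspace x = true)
    (hy : ¬ PySem.Chars.isspace y = true) (ms : List Char) :
    PySem.Chars.strip (x :: (ms ++ [y])) = x :: (ms ++ [y]) := by
  simp [PySem.Chars.strip, PySem.Chars.lstrip, PySem.Chars.rstrip,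
    List.dropWhile_cons_of_neg, hx, hy, List.reverse_append]

theorem pvStripSingleton {x : Char} (hx : ¬ PySem.Chars.isspace x = true) :
    PySem.Chars.strip [x] = [x] := by
  simp [PySem.Chars.strip, PySem.Chars.lstrip, PySem.Chars.rstrip,
    List.dropWhile_cons_of_neg, hx]

theorem pvALoopNil : pvALoop [] = [] := by
  rw [pvALoop]; simp

-- A's loop guard on an explicit cons/append list reads off the two end characters
theorem pvEndsOfCond {x y c d : Char} {ms : List Char}
    (h1 : PySem.Chars.startswith (x :: (ms ++ [y])) [c] = true)
    (h2 : PySem.Chars.endswith (x :: (ms ++ [y])) [d] = true) : x = c ∧ y = d := by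
  simp [PySem.Chars.startswith, List.isPrefixOf] at h1
  simp [PySem.Chars.endswith, List.isSuffixOf, List.isPrefixOf] at h2
  exact ⟨h1.symm, h2.symm⟩

theorem pvCondOfEnds {x y c d : Char} (ms : List Char) (h1 : x = c) (h2 : y = d) :
    PySem.Chars.startswith (x :: (ms ++ [y])) [c] = true ∧
    PySem.Chars.endswith (x :: (ms ++ [y])) [d] = true := by
  constructor
  · simp [PySem.Chars.startswith, List.isPrefixOf, h1]
  · simp [PySem.Chars.endswith, List.isSuffixOf, List.isPrefixOf, h2]

-- front decomposition of the window
theorem pvWindowCons (cs : List Char) (i k : Nat) (hik : i < k) (hk : k ≤ cs.length) :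
    (cs.drop i).take (k - i) =
      cs[i]'(by omega) :: (cs.drop (i + 1)).take (k - (i + 1)) := by
  rw [show k - i = (k - (i + 1)) + 1 by omega,
    List.drop_eq_getElem_cons (show i < cs.length by omega), List.take_succ_cons]

-- back decomposition of the window
theorem pvWindowSnoc (cs : List Char) (i k : Nat) (hik : i < k) (hk : k ≤ cs.length) :
    (cs.drop i).take (k - i) =
      (cs.drop i).take ((k - 1) - i) ++ [cs[k - 1]'(by omega)] := by
  rw [show k - i = ((k - 1) - i) + 1 by omega, List.take_add_one]
  congr 1
  rw [List.getElem?_drop, show i + ((k - 1) - i) = k - 1 by omega,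
    List.getElem?_eq_getElem (show k - 1 < cs.length by omega)]
  rfl

-- the central invariant: pvBGo on window [i,k) computes A's loop on the stripped window
theorem pvBGoEq (n : Nat) : ∀ (cs : List Char) (i k : Nat), k - i ≤ n → k ≤ cs.length → i ≤ k →
    pvBGo cs i k = pvALoop (PySem.Chars.strip ((cs.drop i).take (k - i))) := by
  induction n with
  | zero =>
    intro cs i k hn hk hik
    have hke : k = i := by omega
    subst hke
    rw [pvBGo, dif_neg (fun h => absurd h.1 (by omega)),
      dif_neg (fun h => absurd h.1 (by omega)),
      dif_neg (fun h => absurd h.1 (by omega))]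
    rw [Nat.sub_self]
    simp only [List.take_zero]
    rw [show PySem.Chars.strip [] = [] from rfl, pvALoopNil, PySem.List.slice_natCast]
    simp
  | succ n ih =>
    intro cs i k hn hk hik
    rcases Nat.eq_or_lt_of_le hik with heq | hlt
    · subst heq
      rw [pvBGo, dif_neg (fun h => absurd h.1 (by omega)),
        dif_neg (fun h => absurd h.1 (by omega)),
        dif_neg (fun h => absurd h.1 (by omega))]
      rw [Nat.sub_self]
      simp only [List.take_zero]
      rw [show PySem.Chars.strip [] = [] from rfl, pvALoopNil, PySem.List.slice_natCast]
      simp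
    · have hi : i < cs.length := by omega
      have hgetI : cs.getD i ' ' = cs[i]'hi := by simp [List.getD, List.getElem?_eq_getElem hi]
      have hk1 : k - 1 < cs.length := by omega
      have hgetK : cs.getD (k - 1) ' ' = cs[k - 1]'hk1 := by
        simp [List.getD, List.getElem?_eq_getElem hk1]
      by_cases hws1 : PySem.Chars.isspace (cs[i]'hi) = true
      · -- leading whitespace: advance i
        rw [pvBGo, dif_pos ⟨hlt, by rw [hgetI]; exact hws1⟩]
        rw [ih cs (i + 1) k (by omega) hk (by omega)]
        rw [pvWindowCons cs i k hlt hk, pvStripConsWs hws1]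
      · have hne1 : ¬ (i < k ∧ PySem.Chars.isspace (cs.getD i ' ') = true) := by
          rw [hgetI]; exact fun h => hws1 h.2
        by_cases hws2 : PySem.Chars.isspace (cs[k - 1]'hk1) = true
        · -- trailing whitespace: retract k
          rw [pvBGo, dif_neg hne1, dif_pos ⟨hlt, by rw [hgetK]; exact hws2⟩]
          rw [ih cs i (k - 1) (by omega) (by omega) (by omega)]
          rw [pvWindowSnoc cs i k hlt hk, pvStripAppendWs hws2]
        · have hne2 : ¬ (i < k ∧ PySem.Chars.isspace (cs.getD (k - 1) ' ') = true) := by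
            rw [hgetK]; exact fun h => hws2 h.2
          by_cases hpair : i + 1 < k ∧ pvMatchEnds (cs[i]'hi) (cs[k - 1]'hk1) = true
          · -- matched delimiter pair: peel both ends
            obtain ⟨hik2, hm⟩ := hpair
            rw [pvBGo, dif_neg hne1, dif_neg hne2,
              dif_pos ⟨hik2, by rw [hgetI, hgetK]; exact hm⟩]
            rw [ih cs (i + 1) (k - 1) (by omega) (by omega) (by omega)]
            rw [pvWindowCons cs i k hlt hk, pvWindowSnoc cs (i + 1) k (by omega) hk]
            set mid := (cs.drop (i + 1)).take ((k - 1) - (i + 1)) with hmid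
            have hmidlen : mid.length = k - i - 2 := by
              rw [hmid]
              simp only [List.length_take, List.length_drop]
              omega
            rw [pvStripSelf hws1 hws2]
            have hlen2 : 2 ≤ (cs[i]'hi :: (mid ++ [cs[k - 1]'hk1])).length := by simp
            have hcond : (PySem.Chars.startswith (cs[i]'hi :: (mid ++ [cs[k - 1]'hk1])) ['/'] = true ∧
                  PySem.Chars.endswith (cs[i]'hi :: (mid ++ [cs[k - 1]'hk1])) ['/'] = true) ∨
                (PySem.Chars.startswith (cs[i]'hi :: (mid ++ [cs[k - 1]'hk1])) ['['] = true ∧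
                  PySem.Chars.endswith (cs[i]'hi :: (mid ++ [cs[k - 1]'hk1])) [']'] = true) := by
              have hm' := hm
              simp only [pvMatchEnds, Bool.or_eq_true, Bool.and_eq_true, beq_iff_eq] at hm'
              rcases hm' with ⟨h1, h2⟩ | ⟨h1, h2⟩
              · exact Or.inl (pvCondOfEnds mid h1 h2)
              · exact Or.inr (pvCondOfEnds mid h1 h2)
            conv_rhs => rw [pvALoop]
            rw [dif_pos ⟨hlen2, hcond⟩]
            congr 1
            rw [pvSliceOneNegOne _ hlen2]
            rw [show ((cs[i]'hi) :: (mid ++ [cs[k - 1]'hk1])).drop 1 = mid ++ [cs[k - 1]'hk1] from rfl]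
            rw [show ((cs[i]'hi) :: (mid ++ [cs[k - 1]'hk1])).length - 2 = mid.length from by
              simp only [List.length_cons, List.length_append, List.length_nil]; omega]
            rw [List.take_left]
          · -- terminal: return the current window
            have hne3 : ¬ (i + 1 < k ∧ pvMatchEnds (cs.getD i ' ') (cs.getD (k - 1) ' ') = true) := by
              rw [hgetI, hgetK]; exact hpair
            rw [pvBGo, dif_neg hne1, dif_neg hne2, dif_neg hne3, PySem.List.slice_natCast]
            rcases Nat.eq_or_lt_of_le (show i + 1 ≤ k by omega) with h1 | hik2
            · -- singleton window
              have hsing : (cs.drop i).take (k - i) = [cs[i]'hi] := by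
                rw [pvWindowCons cs i k hlt hk]
                simp [show k - (i + 1) = 0 by omega]
              rw [hsing, pvStripSingleton hws1, pvALoop, dif_neg (by simp)]
            · -- window length ≥ 2, ends do not match
              have hnm : ¬ pvMatchEnds (cs[i]'hi) (cs[k - 1]'hk1) = true :=
                fun hmm => hpair ⟨hik2, hmm⟩
              rw [pvWindowCons cs i k hlt hk, pvWindowSnoc cs (i + 1) k (by omega) hk]
              rw [pvStripSelf hws1 hws2, pvALoop, dif_neg]
              intro ⟨_, hcond⟩
              apply hnm
              simp only [pvMatchEnds, Bool.or_eq_true, Bool.and_eq_true, beq_iff_eq]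
              rcases hcond with ⟨h1, h2⟩ | ⟨h1, h2⟩
              · exact Or.inl (pvEndsOfCond h1 h2)
              · exact Or.inr (pvEndsOfCond h1 h2)

-- ===== VERDICT (by name: the statement is the Claim_ definition above) =====
theorem strip_outer_phonetic_delimiters_py_spec : Claim_equal_strip_outer_phonetic_delimiters_py := by
  intro text _
  unfold Spec_strip_outer_phonetic_delimiters_py
  unfold strip_outer_phonetic_delimiters_py strip_outer_phonetic_delimiters_py_alt
  rw [pvBGoEq text.toList.length text.toList 0 text.toList.length (by omega) (by omega) (by omega)]
  rw [List.drop_zero, Nat.sub_zero, List.take_length]
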